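-- pv_equiv track=rewrite | github.com/1000857282/Corte1-93858 | Corte_2/Tareas/Sesion_10/prueba.py | encontrar_extremos
-- ===== SOURCE A (Python) =====
-- def encontrar_extremos(matriz):
--     maximo = matriz[0][0]
--     minimo = matriz[0][0]
--     pos_max = (0, 0)
--     pos_min = (0, 0)
--
--     for i in range(len(matriz)):
--         for j in range(len(matriz[i])):
--             if matriz[i][j] > maximo:
--                 maximo = matriz[i][j]
--                 pos_max = (i, j)
--             elif matriz[i][j] < minimo:
--                 minimo = matriz[i][j]
--                 pos_min = (i, j)
--
--     return maximo, pos_max, minimo, pos_min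
-- ===== SOURCE B (Python) =====
-- def encontrar_extremos(matriz):
--     cells = [(matriz[i][j], i, j)
--              for i in range(len(matriz)) for j in range(len(matriz[i]))]
--     vmax, imax, jmax = max(cells, key=lambda t: t[0])
--     vmin, imin, jmin = min(cells, key=lambda t: t[0])
--     return vmax, (imax, jmax), vmin, (imin, jmin)
-- ===== Notes on version B (the rewrite author's own statement) =====
-- stated objective: idiomatic
-- what changed: B flattens the matrix once into (value, i, j) cells and obtains both extrema with Python's built-in max/min keyed on the value (first-occurrence tie-breaking), replacing A's nested index loops that hand-maintain four running variables.
import Mathlib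
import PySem

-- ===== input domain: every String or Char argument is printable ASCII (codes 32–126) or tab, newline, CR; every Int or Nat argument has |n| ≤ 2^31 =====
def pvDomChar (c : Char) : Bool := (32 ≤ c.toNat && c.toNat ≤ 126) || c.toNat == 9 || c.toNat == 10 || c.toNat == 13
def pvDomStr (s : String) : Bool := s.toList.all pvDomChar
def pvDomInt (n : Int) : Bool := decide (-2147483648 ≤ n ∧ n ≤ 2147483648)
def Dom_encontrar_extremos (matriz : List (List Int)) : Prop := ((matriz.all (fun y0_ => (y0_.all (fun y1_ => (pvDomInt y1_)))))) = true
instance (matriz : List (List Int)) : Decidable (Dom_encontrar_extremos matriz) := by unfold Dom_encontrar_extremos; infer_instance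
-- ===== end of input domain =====

-- B replaces A's hand-maintained four-field running state with a flattened (value, i, j) cell list
-- scanned by max/min with first-occurrence tie-breaking (objective: idiomatic; same O(n) cost).

-- ===== PORT A =====
-- one iteration of A's loop body: state = (maximo, pos_max, minimo, pos_min), cell value v at (i, j)
def pvStepA (st : Int × (Int × Int) × Int × (Int × Int)) (i j v : Int) :
    Int × (Int × Int) × Int × (Int × Int) :=
  if v > st.1 then (v, (i, j), st.2.2.1, st.2.2.2)
  else if v < st.2.2.1 then (st.1, st.2.1, v, (i, j))
  else st

def encontrar_extremos (matriz : List (List Int)) : Int × (Int × Int) × Int × (Int × Int) :=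
  -- matriz[0][0]; 'none' is Python's IndexError, excluded by Pre_
  let seed : Int := ((PySem.List.pyGet? matriz 0).bind (fun r => PySem.List.pyGet? r 0)).getD 0
  (PySem.List.enumerate matriz 0).foldl
    (fun st p => (PySem.List.enumerate p.2 0).foldl (fun st q => pvStepA st p.1 q.1 q.2) st)
    (seed, (0, 0), seed, (0, 0))

-- ===== PORT B =====
def encontrar_extremos_alt (matriz : List (List Int)) : Int × (Int × Int) × Int × (Int × Int) :=
  let cells := (PySem.List.enumerate matriz 0).flatMap
    (fun p => (PySem.List.enumerate p.2 0).map (fun q => (q.2, p.1, q.1)))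
  match PySem.List.max? cells (fun t => t.1), PySem.List.min? cells (fun t => t.1) with
  | some (vmax, imax, jmax), some (vmin, imin, jmin) => (vmax, (imax, jmax), vmin, (imin, jmin))
  | _, _ => (0, (0, 0), 0, (0, 0))  -- unreachable under Pre_ (Python raises here)

-- ===== PRECONDITION & SPEC =====
-- Pre_ excludes exactly the inputs where A raises IndexError on matriz[0][0]: an empty matrix or an empty first row.
def Pre_encontrar_extremos (matriz : List (List Int)) : Prop :=
  matriz ≠ [] ∧ matriz.headI ≠ []
instance (matriz : List (List Int)) : Decidable (Pre_encontrar_extremos matriz) := by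
  unfold Pre_encontrar_extremos; infer_instance

def pvWitness_encontrar_extremos : List (List Int) := [[3, -1], [4, 3]]

def Spec_encontrar_extremos (matriz : List (List Int)) (out : Int × (Int × Int) × Int × (Int × Int)) : Prop := out = encontrar_extremos_alt matriz
instance (matriz : List (List Int)) (out : Int × (Int × Int) × Int × (Int × Int)) : Decidable (Spec_encontrar_extremos matriz out) := by unfold Spec_encontrar_extremos; infer_instance

-- ===== CLAIM (what is proved, stated in full; the proofs are below) =====
def Claim_equal_encontrar_extremos : Prop := ∀ (matriz : List (List Int)), Dom_encontrar_extremos matriz → Pre_encontrar_extremos matriz → Spec_encontrar_extremos matriz (encontrar_extremos matriz)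


-- ===== LEMMAS AND PROOFS =====

-- the two independent one-cell updates hiding inside pvStepA
def pvStepMax (s : Int × (Int × Int)) (c : Int × Int × Int) : Int × (Int × Int) :=
  if s.1 < c.1 then (c.1, (c.2.1, c.2.2)) else s
def pvStepMin (s : Int × (Int × Int)) (c : Int × Int × Int) : Int × (Int × Int) :=
  if c.1 < s.1 then (c.1, (c.2.1, c.2.2)) else s

-- A's nested loops are a fold of pvStepA over B's flattened cell list
theorem pvNested_eq_cells (matriz : List (List Int)) (init : Int × (Int × Int) × Int × (Int × Int)) (s : Int) :
    (PySem.List.enumerate matriz s).foldl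
      (fun st p => (PySem.List.enumerate p.2 0).foldl (fun st q => pvStepA st p.1 q.1 q.2) st) init
    = ((PySem.List.enumerate matriz s).flatMap
        (fun p => (PySem.List.enumerate p.2 0).map (fun q => (q.2, p.1, q.1)))).foldl
        (fun st c => pvStepA st c.2.1 c.2.2 c.1) init := by
  induction matriz generalizing init s with
  | nil => simp [PySem.List.enumerate]
  | cons r t ih =>
      simp only [PySem.List.enumerate_cons, List.flatMap_cons, List.foldl_cons, List.foldl_append,
        List.foldl_map]
      exact ih _ _

-- folding pvStepA decomposes into the two independent extremum folds (invariant: minimo <= maximo)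
theorem pvDecomp (cs : List (Int × Int × Int)) (m mn : Int) (pm pmn : Int × Int) (h : mn ≤ m) :
    cs.foldl (fun st c => pvStepA st c.2.1 c.2.2 c.1) (m, pm, mn, pmn)
    = ((cs.foldl pvStepMax (m, pm)).1, (cs.foldl pvStepMax (m, pm)).2,
       (cs.foldl pvStepMin (mn, pmn)).1, (cs.foldl pvStepMin (mn, pmn)).2) := by
  induction cs generalizing m mn pm pmn with
  | nil => rfl
  | cons c t ih =>
      obtain ⟨v, i, j⟩ := c
      rw [List.foldl_cons, List.foldl_cons, List.foldl_cons]
      by_cases h1 : v > m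
      · have e1 : pvStepA (m, pm, mn, pmn) i j v = (v, (i, j), mn, pmn) := by
          simp [pvStepA, h1]
        have e2 : pvStepMax (m, pm) (v, i, j) = (v, (i, j)) := by simp [pvStepMax, h1]
        have e3 : pvStepMin (mn, pmn) (v, i, j) = (mn, pmn) := by
          simp [pvStepMin, show ¬ v < mn by omega]
        rw [e1, e2, e3]
        exact ih _ _ _ _ (by omega)
      · by_cases h2 : v < mn
        · have e1 : pvStepA (m, pm, mn, pmn) i j v = (m, pm, v, (i, j)) := by
            simp [pvStepA, h1, h2]
          have e2 : pvStepMax (m, pm) (v, i, j) = (m, pm) := by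
            simp [pvStepMax, show ¬ m < v from h1]
          have e3 : pvStepMin (mn, pmn) (v, i, j) = (v, (i, j)) := by simp [pvStepMin, h2]
          rw [e1, e2, e3]
          exact ih _ _ _ _ (by omega)
        · have e1 : pvStepA (m, pm, mn, pmn) i j v = (m, pm, mn, pmn) := by
            simp [pvStepA, h1, h2]
          have e2 : pvStepMax (m, pm) (v, i, j) = (m, pm) := by
            simp [pvStepMax, show ¬ m < v from h1]
          have e3 : pvStepMin (mn, pmn) (v, i, j) = (mn, pmn) := by simp [pvStepMin, h2]
          rw [e1, e2, e3]
          exact ih _ _ _ _ h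

-- the fold bodies of PySem.List.max? / min? as named functions
def pvGMax (acc : Option (Int × Int × Int)) (x : Int × Int × Int) : Option (Int × Int × Int) :=
  match acc with
  | none => some x
  | some m => if (fun t => t.1) m < (fun t => t.1) x then some x else some m
def pvGMin (acc : Option (Int × Int × Int)) (x : Int × Int × Int) : Option (Int × Int × Int) :=
  match acc with
  | none => some x
  | some m => if (fun t => t.1) x < (fun t => t.1) m then some x else some m

-- PySem.List.max?/min? started at a known element are the pvStepMax/pvStepMin folds
theorem pvMaxRel (t : List (Int × Int × Int)) (v i j : Int) :
    t.foldl pvGMax (some (v, i, j))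
    = some ((t.foldl pvStepMax (v, (i, j))).1,
            (t.foldl pvStepMax (v, (i, j))).2.1, (t.foldl pvStepMax (v, (i, j))).2.2) := by
  induction t generalizing v i j with
  | nil => rfl
  | cons c t ih =>
      obtain ⟨w, a, b⟩ := c
      rw [List.foldl_cons, List.foldl_cons,
        show pvGMax (some (v, i, j)) (w, a, b)
          = if v < w then some (w, a, b) else some (v, i, j) from rfl,
        show pvStepMax (v, (i, j)) (w, a, b)
          = if v < w then (w, (a, b)) else (v, (i, j)) from rfl]
      by_cases h : v < w
      · rw [if_pos h, if_pos h]; exact ih w a b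
      · rw [if_neg h, if_neg h]; exact ih v i j

theorem pvMinRel (t : List (Int × Int × Int)) (v i j : Int) :
    t.foldl pvGMin (some (v, i, j))
    = some ((t.foldl pvStepMin (v, (i, j))).1,
            (t.foldl pvStepMin (v, (i, j))).2.1, (t.foldl pvStepMin (v, (i, j))).2.2) := by
  induction t generalizing v i j with
  | nil => rfl
  | cons c t ih =>
      obtain ⟨w, a, b⟩ := c
      rw [List.foldl_cons, List.foldl_cons,
        show pvGMin (some (v, i, j)) (w, a, b)
          = if w < v then some (w, a, b) else some (v, i, j) from rfl,
        show pvStepMin (v, (i, j)) (w, a, b)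
          = if w < v then (w, (a, b)) else (v, (i, j)) from rfl]
      by_cases h : w < v
      · rw [if_pos h, if_pos h]; exact ih w a b
      · rw [if_neg h, if_neg h]; exact ih v i j

-- max?/min? on a cons: the head seeds the accumulator
theorem pvMaxCons (t : List (Int × Int × Int)) (v i j : Int) :
    PySem.List.max? ((v, i, j) :: t) (fun t => t.1)
    = some ((t.foldl pvStepMax (v, (i, j))).1,
            (t.foldl pvStepMax (v, (i, j))).2.1, (t.foldl pvStepMax (v, (i, j))).2.2) := by
  unfold PySem.List.max?
  rw [List.foldl_cons]
  exact Eq.trans (List.foldl_ext _ pvGMax _ (fun a b _ => by cases a <;> rfl)) (pvMaxRel t v i j)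

theorem pvMinCons (t : List (Int × Int × Int)) (v i j : Int) :
    PySem.List.min? ((v, i, j) :: t) (fun t => t.1)
    = some ((t.foldl pvStepMin (v, (i, j))).1,
            (t.foldl pvStepMin (v, (i, j))).2.1, (t.foldl pvStepMin (v, (i, j))).2.2) := by
  unfold PySem.List.min?
  rw [List.foldl_cons]
  exact Eq.trans (List.foldl_ext _ pvGMin _ (fun a b _ => by cases a <;> rfl)) (pvMinRel t v i j)

-- ===== VERDICT (by name: the statement is the Claim_ definition above) =====
theorem encontrar_extremos_spec : Claim_equal_encontrar_extremos := by
  intro matriz _ hpre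
  obtain ⟨h0, h1⟩ := hpre
  obtain ⟨r0, rs, rfl⟩ : ∃ r0 rs, matriz = r0 :: rs := by
    cases matriz with
    | nil => exact absurd rfl h0
    | cons r0 rs => exact ⟨r0, rs, rfl⟩
  obtain ⟨x, r0t, rfl⟩ : ∃ x r0t, r0 = x :: r0t := by
    cases r0 with
    | nil => simp at h1
    | cons x t => exact ⟨x, t, rfl⟩
  show encontrar_extremos _ = encontrar_extremos_alt _
  have hseed : ((PySem.List.pyGet? ((x :: r0t) :: rs) 0).bind
      (fun r => PySem.List.pyGet? r 0)).getD 0 = x := by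
    simp [PySem.List.pyGet?, PySem.List.pyIdx?]
  have hcells : ((PySem.List.enumerate ((x :: r0t) :: rs) 0).flatMap
      (fun p => (PySem.List.enumerate p.2 0).map (fun q => (q.2, p.1, q.1))))
      = (x, 0, 0) :: ((PySem.List.enumerate r0t 1).map (fun q => (q.2, (0 : Int), q.1))
          ++ (PySem.List.enumerate rs 1).flatMap
              (fun p => (PySem.List.enumerate p.2 0).map (fun q => (q.2, p.1, q.1)))) := by
    simp [PySem.List.enumerate_cons]
  simp only [encontrar_extremos, encontrar_extremos_alt, hseed, pvNested_eq_cells, hcells]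
  set cs := ((PySem.List.enumerate r0t 1).map (fun q => (q.2, (0 : Int), q.1))
      ++ (PySem.List.enumerate rs 1).flatMap
          (fun p => (PySem.List.enumerate p.2 0).map (fun q => (q.2, p.1, q.1)))) with hcs
  rw [List.foldl_cons]
  have hstep : pvStepA (x, (0, 0), x, (0, 0)) 0 0 x = (x, (0, 0), x, (0, 0)) := by
    simp [pvStepA]
  rw [hstep, pvDecomp cs x x (0, 0) (0, 0) le_rfl, pvMaxCons cs x 0 0, pvMinCons cs x 0 0]
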